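-- pv_equiv track=rewrite | github.com/tangaode/scRT-agent | scrt_agent/utils.py | _normalize_doc_name
-- ===== SOURCE A (Python) =====
-- def _normalize_doc_name(name: str) -> str:
--     replacements = {
--         "sc.": "scanpy.",
--         "ad.": "anndata.",
--         "ir.": "scirpy.",
--     }
--     for prefix, replacement in replacements.items():
--         if name.startswith(prefix):
--             return replacement + name[len(prefix) :]
--     return name
-- ===== SOURCE B (Python) =====
-- def _normalize_doc_name(name: str) -> str:
--     replacements = {
--         "sc.": "scanpy.",
--         "ad.": "anndata.",
--         "ir.": "scirpy.",
--     }
--     key = name[: name.find(".") + 1]  # "" when name contains no dot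
--     replacement = replacements.get(key)
--     if replacement is None:
--         return name
--     return replacement + name[len(key):]
-- ===== Notes on version B (the rewrite author's own statement) =====
-- stated objective: alternative
-- what changed: Replaces the loop of repeated startswith scans over the replacements table by computing the candidate prefix key (everything up to and including the first dot) once and doing a single dict lookup.
import Mathlib
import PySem

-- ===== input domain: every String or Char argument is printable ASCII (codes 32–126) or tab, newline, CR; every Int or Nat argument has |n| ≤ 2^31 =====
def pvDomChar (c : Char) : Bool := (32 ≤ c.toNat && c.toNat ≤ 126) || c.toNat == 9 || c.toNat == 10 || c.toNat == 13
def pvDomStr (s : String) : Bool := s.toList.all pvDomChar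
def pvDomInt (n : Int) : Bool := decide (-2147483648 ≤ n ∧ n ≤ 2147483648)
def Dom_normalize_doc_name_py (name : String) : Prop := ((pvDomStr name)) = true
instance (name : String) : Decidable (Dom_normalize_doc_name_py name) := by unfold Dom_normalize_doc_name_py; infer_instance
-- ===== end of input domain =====

-- B replaces A's loop of startswith scans by computing the prefix key up to the first dot once
-- and doing a single dict lookup (objective: alternative; same return value on every input).

-- the replacements dict literal both Pythons build
def pvReplacements : PySem.Dict String String :=
  PySem.Dict.ofList [("sc.", "scanpy."), ("ad.", "anndata."), ("ir.", "scirpy.")]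

-- ===== PORT A =====
-- the 'for prefix, replacement in replacements.items()' loop with its early return
def normalize_doc_name_py_loop (name : String) : List (String × String) → String
  | [] => name
  | (pre, repl) :: rest =>
      if PySem.Str.startswith name pre then
        -- replacement + name[len(prefix):]  (concatenation via toList ++, exact on Dom)
        String.ofList (repl.toList ++ PySem.List.slice name.toList (some (PySem.Str.len pre)) none)
      else normalize_doc_name_py_loop name rest

def normalize_doc_name_py (name : String) : String :=
  normalize_doc_name_py_loop name pvReplacements.items

-- ===== PORT B =====
def normalize_doc_name_py_alt (name : String) : String :=
  -- key = name[: name.find(".") + 1]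
  let key : String := String.ofList
    (PySem.List.slice name.toList none (some (PySem.Str.find name "." + 1)))
  match pvReplacements.get? key with
  | none => name
  | some repl =>
      -- replacement + name[len(key):]
      String.ofList (repl.toList ++ PySem.List.slice name.toList (some (PySem.Str.len key)) none)

-- ===== PRECONDITION & SPEC =====
def Spec_normalize_doc_name_py (name : String) (out : String) : Prop := out = normalize_doc_name_py_alt name
instance (name : String) (out : String) : Decidable (Spec_normalize_doc_name_py name out) := by unfold Spec_normalize_doc_name_py; infer_instance

-- ===== CLAIM (what is proved, stated in full; the proofs are below) =====
def Claim_equal_normalize_doc_name_py : Prop := ∀ (name : String), Dom_normalize_doc_name_py name → Spec_normalize_doc_name_py name (normalize_doc_name_py name)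

-- ===== LEMMAS AND PROOFS =====

theorem pvReps_items : pvReplacements.items =
    [("sc.", "scanpy."), ("ad.", "anndata."), ("ir.", "scirpy.")] := by decide

theorem pvReps_get_miss (s : String) (h : s.toList.length ≠ 3) :
    pvReplacements.get? s = none := by
  simp only [PySem.Dict.get?, pvReps_items, List.find?, Option.map_eq_none_iff]
  have h1 : ("sc." == s) = false := by
    rw [beq_eq_false_iff_ne]; rintro rfl; simp at h
  have h2 : ("ad." == s) = false := by
    rw [beq_eq_false_iff_ne]; rintro rfl; simp at h
  have h3 : ("ir." == s) = false := by
    rw [beq_eq_false_iff_ne]; rintro rfl; simp at h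
  simp [h1, h2, h3]

theorem pvReps_get_three (c1 c2 : Char) (h1 : ¬('s' = c1 ∧ 'c' = c2))
    (h2 : ¬('a' = c1 ∧ 'd' = c2)) (h3 : ¬('i' = c1 ∧ 'r' = c2)) :
    pvReplacements.get? (String.ofList [c1, c2, '.']) = none := by
  simp only [PySem.Dict.get?, pvReps_items, List.find?, Option.map_eq_none_iff]
  have e1 : ("sc." == String.ofList [c1, c2, '.']) = false := by
    rw [beq_eq_false_iff_ne]
    intro h; replace h := congrArg String.toList h; simp at h
    exact h1 ⟨h.1, h.2⟩
  have e2 : ("ad." == String.ofList [c1, c2, '.']) = false := by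
    rw [beq_eq_false_iff_ne]
    intro h; replace h := congrArg String.toList h; simp at h
    exact h2 ⟨h.1, h.2⟩
  have e3 : ("ir." == String.ofList [c1, c2, '.']) = false := by
    rw [beq_eq_false_iff_ne]
    intro h; replace h := congrArg String.toList h; simp at h
    exact h3 ⟨h.1, h.2⟩
  simp [e1, e2, e3]

theorem pv_go_cons (c : Char) (t : List Char) (k : ℕ) :
    PySem.Chars.find.go ['.'] (c :: t) k =
      if ('.' == c) then (k : ℤ) else PySem.Chars.find.go ['.'] t (k + 1) := by
  simp [PySem.Chars.find.go, List.isPrefixOf]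

theorem pv_go_nil (k : ℕ) : PySem.Chars.find.go ['.'] [] k = -1 := by
  simp [PySem.Chars.find.go, List.isEmpty]

theorem pv_go_cases (l : List Char) (k : ℕ) :
    PySem.Chars.find.go ['.'] l k = -1 ∨
    ∃ n : ℕ, n < l.length ∧ PySem.Chars.find.go ['.'] l k = (k : ℤ) + n := by
  induction l generalizing k with
  | nil => exact Or.inl (pv_go_nil k)
  | cons c t ih =>
    rw [pv_go_cons]
    by_cases h : ('.' == c) = true
    · simp only [h, if_true]; right; exact ⟨0, by simp, by simp⟩
    · simp only [h, if_neg, Bool.false_eq_true, not_false_iff]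
      rcases ih (k + 1) with h1 | ⟨n, hn, h2⟩
      · exact Or.inl h1
      · right; exact ⟨n + 1, by simpa using Nat.succ_lt_succ hn, by rw [h2]; push_cast; ring⟩

theorem pv_main (name : String) : normalize_doc_name_py name = normalize_doc_name_py_alt name := by
  rcases hl : name.toList with _ | ⟨c1, _ | ⟨c2, _ | ⟨c3, rest⟩⟩⟩
  · simp only [normalize_doc_name_py, normalize_doc_name_py_alt, pvReps_items,
      normalize_doc_name_py_loop, PySem.Str.startswith, PySem.Chars.startswith,
      PySem.Str.find, PySem.Chars.find, hl]
    simp [pv_go_nil]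
    have h0 : pvReplacements.get? (String.ofList (PySem.List.slice ([] : List Char) none (some 0))) = none := by decide
    rw [h0]
  · simp only [normalize_doc_name_py, normalize_doc_name_py_alt, pvReps_items,
      normalize_doc_name_py_loop, PySem.Str.startswith, PySem.Chars.startswith,
      PySem.Str.find, PySem.Chars.find, hl]
    by_cases hc : c1 = '.'
    · subst hc
      simp [pv_go_cons]
      rw [show pvReplacements.get? (String.ofList (PySem.List.slice ['.'] none (some 1))) = none from by decide]
    · simp [pv_go_cons, pv_go_nil, Ne.symm hc, PySem.List.slice_to]
      rw [show pvReplacements.get? (String.ofList ([] : List Char)) = none from by decide]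
  · simp only [normalize_doc_name_py, normalize_doc_name_py_alt, pvReps_items,
      normalize_doc_name_py_loop, PySem.Str.startswith, PySem.Chars.startswith,
      PySem.Str.find, PySem.Chars.find, hl]
    by_cases h1 : c1 = '.'
    · subst h1
      simp [pv_go_cons]
      have hs : PySem.List.slice ['.', c2] none (some 1) = ['.'] := by simp [PySem.List.slice_to]
      rw [hs, show pvReplacements.get? (String.ofList ['.']) = none from by decide]
    · by_cases h2 : c2 = '.'
      · subst h2
        simp [pv_go_cons, Ne.symm h1]
        have hs : PySem.List.slice [c1, '.'] none (some 2) = [c1, '.'] := by simp [PySem.List.slice_to]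
        rw [hs, pvReps_get_miss _ (by simp)]
      · simp [pv_go_cons, pv_go_nil, Ne.symm h1, Ne.symm h2, PySem.List.slice_to]
        rw [show pvReplacements.get? "" = none from by decide]
  · simp only [normalize_doc_name_py, normalize_doc_name_py_alt, pvReps_items,
      normalize_doc_name_py_loop, PySem.Str.startswith, PySem.Chars.startswith,
      PySem.Str.find, PySem.Chars.find, hl]
    by_cases h1 : c1 = '.'
    · subst h1
      simp [pv_go_cons]
      have hs : PySem.List.slice ('.' :: c2 :: c3 :: rest) none (some 1) = ['.'] := by
        simp [PySem.List.slice_to]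
      rw [hs, show pvReplacements.get? (String.ofList ['.']) = none from by decide]
    · by_cases h2 : c2 = '.'
      · subst h2
        simp [pv_go_cons, Ne.symm h1]
        have hs : PySem.List.slice (c1 :: '.' :: c3 :: rest) none (some 2) = [c1, '.'] := by
          simp [PySem.List.slice_to]
        rw [hs, pvReps_get_miss _ (by simp)]
      · by_cases h3 : c3 = '.'
        · subst h3
          simp [pv_go_cons, Ne.symm h1, Ne.symm h2]
          have hs : PySem.List.slice (c1 :: c2 :: '.' :: rest) none (some 3) = [c1, c2, '.'] := by
            simp [PySem.List.slice_to]
          rw [hs]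
          by_cases p1 : 's' = c1 ∧ 'c' = c2
          · obtain ⟨e1, e2⟩ := p1; subst e1; subst e2
            rw [show pvReplacements.get? (String.ofList ['s', 'c', '.']) = some "scanpy." from by decide]
            simp [PySem.List.slice_from]
            rw [← String.toList_inj]; simp
          · by_cases p2 : 'a' = c1 ∧ 'd' = c2
            · obtain ⟨e1, e2⟩ := p2; subst e1; subst e2
              rw [show pvReplacements.get? (String.ofList ['a', 'd', '.']) = some "anndata." from by decide]
              simp [PySem.List.slice_from]
              rw [← String.toList_inj]; simp
            · by_cases p3 : 'i' = c1 ∧ 'r' = c2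
              · obtain ⟨e1, e2⟩ := p3; subst e1; subst e2
                rw [show pvReplacements.get? (String.ofList ['i', 'r', '.']) = some "scirpy." from by decide]
                simp [PySem.List.slice_from]
                rw [← String.toList_inj]; simp
              · rw [pvReps_get_three c1 c2 p1 p2 p3]
                simp [p1, p2, p3]
        · rcases pv_go_cases rest 3 with hg | ⟨n, hn, hg⟩
          · simp [pv_go_cons, Ne.symm h1, Ne.symm h2, Ne.symm h3, hg, PySem.List.slice_to]
            rw [show pvReplacements.get? "" = none from by decide]
          · simp [pv_go_cons, Ne.symm h1, Ne.symm h2, Ne.symm h3, hg]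
            rw [pvReps_get_miss _ (by
              rw [PySem.List.slice_to]
              simp only [String.toList_ofList, List.length_take, List.length_cons]
              omega
              omega)]

-- ===== VERDICT (by name: the statement is the Claim_ definition above) =====
theorem normalize_doc_name_py_spec : Claim_equal_normalize_doc_name_py := by
  intro name _
  unfold Spec_normalize_doc_name_py
  exact pv_main name
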